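-- pv_equiv track=rewrite | github.com/JoNowakowska/CodeChallenges | AlphabetWar.py | alphabet_war
-- ===== SOURCE A (Python) =====
-- def alphabet_war(fight):
--     # defining initial scores and a winner
--     left_score = 0
--     right_score = 0
--     winner = ''
--
--     # defining weapons of both teams
--     left_weapons = {
--         "w": 4,
--         "p": 3,
--         "b": 2,
--         "s": 1
--     }
--     right_weapons = {
--         "m": 4,
--         "q": 3,
--         "d": 2,
--         "z": 1
--     }
--
--     # fight
--     for f in fight:
--         if f in left_weapons:
--             left_score += left_weapons[f]
--         elif f in right_weapons:
--             right_score += right_weapons[f]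
--
--     # checking who won
--     if left_score > right_score:
--         winner = 'Left side wins!'
--     elif left_score < right_score:
--         winner = 'Right side wins!'
--     else:
--         winner = 'Let\'s fight again!'
--
--     return winner
-- ===== SOURCE B (Python) =====
-- def alphabet_war(fight):
--     # stage 1: histogram of all characters
--     counts = {}
--     for c in fight:
--         counts[c] = counts.get(c, 0) + 1
--     # stage 2: closed-form net score from the eight weapon counts
--     net = (4 * counts.get('w', 0) + 3 * counts.get('p', 0)
--            + 2 * counts.get('b', 0) + counts.get('s', 0)
--            - 4 * counts.get('m', 0) - 3 * counts.get('q', 0)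
--            - 2 * counts.get('d', 0) - counts.get('z', 0))
--     if net > 0:
--         return 'Left side wins!'
--     if net < 0:
--         return 'Right side wins!'
--     return 'Let\'s fight again!'
-- ===== Notes on version B (the rewrite author's own statement) =====
-- stated objective: alternative
-- what changed: A accumulates two scores by looking up each character's weight during the scan; B first builds a character histogram in one pass and then computes a single signed net score as a closed-form linear combination of the eight weapon counts.
import Mathlib
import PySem

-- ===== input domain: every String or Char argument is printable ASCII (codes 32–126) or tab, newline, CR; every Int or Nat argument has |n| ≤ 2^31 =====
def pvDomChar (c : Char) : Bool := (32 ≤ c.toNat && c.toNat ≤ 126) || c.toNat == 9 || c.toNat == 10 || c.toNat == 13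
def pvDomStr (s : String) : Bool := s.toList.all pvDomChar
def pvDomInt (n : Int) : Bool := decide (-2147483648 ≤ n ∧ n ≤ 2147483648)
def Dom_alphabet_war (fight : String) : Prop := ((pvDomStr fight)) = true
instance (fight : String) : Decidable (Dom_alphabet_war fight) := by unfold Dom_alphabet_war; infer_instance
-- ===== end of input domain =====

-- B replaces A's scan-with-lookup (two scores, per-character dict membership) by a staged algorithm: one histogram pass, then a closed-form signed net from the eight weapon counts (objective: alternative).


-- ===== PORT A =====
def awLeftWeapons : PySem.Dict Char Int :=
  PySem.Dict.ofList [('w', 4), ('p', 3), ('b', 2), ('s', 1)]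

def awRightWeapons : PySem.Dict Char Int :=
  PySem.Dict.ofList [('m', 4), ('q', 3), ('d', 2), ('z', 1)]

-- A's loop body: two accumulators (left_score, right_score), a membership test on each dict
def awStep (st : Int × Int) (f : Char) : Int × Int :=
  if awLeftWeapons.contains f then (st.1 + (awLeftWeapons.get? f).getD 0, st.2)
  else if awRightWeapons.contains f then (st.1, st.2 + (awRightWeapons.get? f).getD 0)
  else st

def alphabet_war (fight : String) : String :=
  let scores := fight.toList.foldl awStep (0, 0)
  if scores.1 > scores.2 then "Left side wins!"
  else if scores.1 < scores.2 then "Right side wins!"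
  else "Let's fight again!"

-- ===== PORT B =====
-- stage 1: histogram loop 'counts[c] = counts.get(c, 0) + 1'; stage 2: closed-form net from eight counts
def alphabet_war_alt (fight : String) : String :=
  let counts : PySem.Dict Char Int :=
    fight.toList.foldl (fun d c => d.insert c (d.getD c 0 + 1)) PySem.Dict.empty
  let net : Int :=
    4 * counts.getD 'w' 0 + 3 * counts.getD 'p' 0 + 2 * counts.getD 'b' 0 + counts.getD 's' 0
    - 4 * counts.getD 'm' 0 - 3 * counts.getD 'q' 0 - 2 * counts.getD 'd' 0 - counts.getD 'z' 0
  if net > 0 then "Left side wins!"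
  else if net < 0 then "Right side wins!"
  else "Let's fight again!"

-- ===== PRECONDITION & SPEC =====
def Spec_alphabet_war (fight : String) (out : String) : Prop := out = alphabet_war_alt fight
instance (fight : String) (out : String) : Decidable (Spec_alphabet_war fight out) := by unfold Spec_alphabet_war; infer_instance

-- ===== CLAIM =====
def Claim_equal_alphabet_war : Prop := ∀ (fight : String), Dom_alphabet_war fight → Spec_alphabet_war fight (alphabet_war fight)

-- ===== LEMMAS AND PROOFS =====

-- A's fold computes linear combinations of the eight weapon counts
lemma aw_fold (cs : List Char) : ∀ (l r : Int),
    cs.foldl awStep (l, r) =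
      (l + 4 * cs.count 'w' + 3 * cs.count 'p' + 2 * cs.count 'b' + cs.count 's',
       r + 4 * cs.count 'm' + 3 * cs.count 'q' + 2 * cs.count 'd' + cs.count 'z') := by
  induction cs with
  | nil => intro l r; simp
  | cons c cs ih =>
      intro l r
      rw [List.foldl_cons, ih]
      by_cases h1 : c = 'w'
      · subst h1; simp [awStep, show awLeftWeapons.contains 'w' = true from by decide,
          show (awLeftWeapons.get? 'w').getD 0 = (4:Int) from by decide]; omega
      by_cases h2 : c = 'p'
      · subst h2; simp [awStep, show awLeftWeapons.contains 'p' = true from by decide,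
          show (awLeftWeapons.get? 'p').getD 0 = (3:Int) from by decide]; omega
      by_cases h3 : c = 'b'
      · subst h3; simp [awStep, show awLeftWeapons.contains 'b' = true from by decide,
          show (awLeftWeapons.get? 'b').getD 0 = (2:Int) from by decide]; omega
      by_cases h4 : c = 's'
      · subst h4; simp [awStep, show awLeftWeapons.contains 's' = true from by decide,
          show (awLeftWeapons.get? 's').getD 0 = (1:Int) from by decide]; omega
      by_cases h5 : c = 'm'
      · subst h5; simp [awStep, show awLeftWeapons.contains 'm' = false from by decide,
          show awRightWeapons.contains 'm' = true from by decide,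
          show (awRightWeapons.get? 'm').getD 0 = (4:Int) from by decide]; omega
      by_cases h6 : c = 'q'
      · subst h6; simp [awStep, show awLeftWeapons.contains 'q' = false from by decide,
          show awRightWeapons.contains 'q' = true from by decide,
          show (awRightWeapons.get? 'q').getD 0 = (3:Int) from by decide]; omega
      by_cases h7 : c = 'd'
      · subst h7; simp [awStep, show awLeftWeapons.contains 'd' = false from by decide,
          show awRightWeapons.contains 'd' = true from by decide,
          show (awRightWeapons.get? 'd').getD 0 = (2:Int) from by decide]; omega
      by_cases h8 : c = 'z'
      · subst h8; simp [awStep, show awLeftWeapons.contains 'z' = false from by decide,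
          show awRightWeapons.contains 'z' = true from by decide,
          show (awRightWeapons.get? 'z').getD 0 = (1:Int) from by decide]; omega
      -- no weapon: both score components unchanged, all eight counts unchanged
      have hL : awLeftWeapons.contains c = false := by
        have e : awLeftWeapons = PySem.Dict.mk [('w', 4), ('p', 3), ('b', 2), ('s', 1)] := by decide
        simp [e, PySem.Dict.contains, Ne.symm h1, Ne.symm h2, Ne.symm h3, Ne.symm h4]
      have hR : awRightWeapons.contains c = false := by
        have e : awRightWeapons = PySem.Dict.mk [('m', 4), ('q', 3), ('d', 2), ('z', 1)] := by decide
        simp [e, PySem.Dict.contains, Ne.symm h5, Ne.symm h6, Ne.symm h7, Ne.symm h8]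
      simp [awStep, hL, hR, h1, h2, h3, h4, h5, h6, h7, h8]

-- ===== VERDICT =====
theorem alphabet_war_spec : Claim_equal_alphabet_war := by
  intro fight _
  unfold Spec_alphabet_war alphabet_war alphabet_war_alt
  rw [aw_fold]
  simp only [PySem.Dict.getD_foldl_insert_add_one]
  have he : ∀ c : Char, (PySem.Dict.empty : PySem.Dict Char Int).getD c 0 = 0 := by
    intro c; rfl
  simp only [he, zero_add]
  split_ifs <;> first | rfl | omega
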